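-- pv_equiv track=rewrite | github.com/mavlink/qgroundcontrol | .github/scripts/check_baseline_ready.py | evaluate_readiness
-- ===== SOURCE A (Python) =====
-- from typing import Any
--
-- def evaluate_readiness(
--     runs: list[dict[str, Any]],
--     platforms: list[str],
--     event: str = "push",
-- ) -> tuple[bool, list[str], list[str], list[str]]:
--     """Return readiness and missing/incomplete/failed platform workflow lists."""
--     latest_by_name: dict[str, dict[str, Any]] = {}
--     target = set(platforms)
--
--     for run in runs:
--         name = str(run.get("name", ""))
--         if name not in target:
--             continue
--         if str(run.get("event", "")) != event:
--             continue
--         existing = latest_by_name.get(name)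
--         if existing is None or str(run.get("created_at", "")) > str(existing.get("created_at", "")):
--             latest_by_name[name] = run
--
--     missing = [name for name in platforms if name not in latest_by_name]
--     incomplete = [
--         name for name in platforms
--         if name in latest_by_name and str(latest_by_name[name].get("status", "")) != "completed"
--     ]
--     failed = [
--         name for name in platforms
--         if name in latest_by_name
--         and str(latest_by_name[name].get("status", "")) == "completed"
--         and str(latest_by_name[name].get("conclusion", "")) != "success"
--     ]
--
--     ready = not missing and not incomplete and not failed
--     return ready, missing, incomplete, failed
-- ===== SOURCE B (Python) =====
-- def evaluate_readiness(runs, platforms, event="push"):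
--     missing, incomplete, failed = [], [], []
--     for name in platforms:
--         best = None
--         for run in runs:
--             if str(run.get("name", "")) != name or str(run.get("event", "")) != event:
--                 continue
--             if best is None or str(run.get("created_at", "")) > str(best.get("created_at", "")):
--                 best = run
--         if best is None:
--             missing.append(name)
--         elif str(best.get("status", "")) != "completed":
--             incomplete.append(name)
--         elif str(best.get("conclusion", "")) != "success":
--             failed.append(name)
--     ready = not (missing or incomplete or failed)
--     return ready, missing, incomplete, failed
-- ===== Notes on version B (the rewrite author's own statement) =====
-- stated objective: simpler
-- what changed: B drops the latest_by_name dict and the set(platforms) filter entirely: for each platform it scans runs once for that platform's latest matching run and classifies it immediately into missing/incomplete/failed with a single if/elif chain.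
import Mathlib
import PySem

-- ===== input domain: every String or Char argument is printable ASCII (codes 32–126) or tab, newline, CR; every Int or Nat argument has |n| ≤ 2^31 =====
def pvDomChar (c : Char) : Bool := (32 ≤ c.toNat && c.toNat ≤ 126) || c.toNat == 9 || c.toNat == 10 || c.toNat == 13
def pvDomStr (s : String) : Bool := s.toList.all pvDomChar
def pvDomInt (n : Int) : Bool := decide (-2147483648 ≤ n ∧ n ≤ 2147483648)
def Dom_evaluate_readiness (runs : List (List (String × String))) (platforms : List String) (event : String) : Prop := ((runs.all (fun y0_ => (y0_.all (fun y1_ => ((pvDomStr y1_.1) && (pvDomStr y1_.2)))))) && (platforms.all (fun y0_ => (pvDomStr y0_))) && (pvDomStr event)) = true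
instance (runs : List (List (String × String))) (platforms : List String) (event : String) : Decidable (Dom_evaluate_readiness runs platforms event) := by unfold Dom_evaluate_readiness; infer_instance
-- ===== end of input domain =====

-- B drops A's latest_by_name dict: per platform it scans runs for the latest matching run and
-- classifies it at once (simpler decomposition; not claimed faster).

-- shared primitive: run.get(key, "") on the association list (first match, Python dict lookup)
def rget (run : List (String × String)) (key : String) : String :=
  (((run.find? (fun p => p.1 == key)).map (fun p => p.2)).getD "")

-- ===== PORT A =====
-- the dict-building loop over runs
def aBuild (runs : List (List (String × String))) (platforms : List String) (event : String) :
    PySem.Dict String (List (String × String)) :=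
  let target := PySem.Set.ofList platforms
  runs.foldl (fun d run =>
    let name := rget run "name"
    if ¬ (target.contains name) then d
    else if rget run "event" ≠ event then d
    else
      match d.get? name with
      | none => d.insert name run
      | some existing =>
        if decide (rget existing "created_at" < rget run "created_at") then d.insert name run
        else d) PySem.Dict.empty

def evaluate_readiness (runs : List (List (String × String))) (platforms : List String) (event : String) : Bool × List String × List String × List String :=
  let latest := aBuild runs platforms event
  let missing := platforms.filter (fun name => ¬ latest.contains name)
  let incomplete := platforms.filter (fun name =>
    latest.contains name ∧ rget (latest.getD name []) "status" ≠ "completed")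
  let failed := platforms.filter (fun name =>
    latest.contains name ∧ rget (latest.getD name []) "status" = "completed"
      ∧ rget (latest.getD name []) "conclusion" ≠ "success")
  let ready := missing.isEmpty && incomplete.isEmpty && failed.isEmpty
  (ready, missing, incomplete, failed)

-- ===== PORT B =====
-- inner loop of B: the latest run for this platform name, strict > keeps the earlier one on ties
def bBest (runs : List (List (String × String))) (name : String) (event : String) :
    Option (List (String × String)) :=
  runs.foldl (fun best run =>
    if rget run "name" ≠ name ∨ rget run "event" ≠ event then best
    else
      match best with
      | none => some run
      | some b =>
        if decide (rget b "created_at" < rget run "created_at") then some run else best) none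

-- classification step of B's single for-loop over platforms
def bStep (runs : List (List (String × String))) (event : String)
    (acc : List String × List String × List String) (name : String) :
    List String × List String × List String :=
  match bBest runs name event with
  | none => (acc.1 ++ [name], acc.2.1, acc.2.2)
  | some b =>
    if rget b "status" ≠ "completed" then (acc.1, acc.2.1 ++ [name], acc.2.2)
    else if rget b "conclusion" ≠ "success" then (acc.1, acc.2.1, acc.2.2 ++ [name])
    else acc

def evaluate_readiness_alt (runs : List (List (String × String))) (platforms : List String) (event : String) : Bool × List String × List String × List String :=
  let acc := platforms.foldl (bStep runs event) ([], [], [])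
  let ready := acc.1.isEmpty && acc.2.1.isEmpty && acc.2.2.isEmpty
  (ready, acc.1, acc.2.1, acc.2.2)

-- ===== PRECONDITION & SPEC =====
def Spec_evaluate_readiness (runs : List (List (String × String))) (platforms : List String) (event : String) (out : Bool × List String × List String × List String) : Prop := out = evaluate_readiness_alt runs platforms event
instance (runs : List (List (String × String))) (platforms : List String) (event : String) (out : Bool × List String × List String × List String) : Decidable (Spec_evaluate_readiness runs platforms event out) := by unfold Spec_evaluate_readiness; infer_instance

-- ===== CLAIM (what is proved, stated in full; the proofs are below) =====
def Claim_equal_evaluate_readiness : Prop := ∀ (runs : List (List (String × String))) (platforms : List String) (event : String), Dom_evaluate_readiness runs platforms event → Spec_evaluate_readiness runs platforms event (evaluate_readiness runs platforms event)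

-- ===== LEMMAS AND PROOFS =====

-- the loop invariant: the dict's entry at key name tracks B's best-accumulator
theorem loop_get (tgt : PySem.Set String) (event name : String)
    (hmem : tgt.contains name = true) (runs : List (List (String × String))) :
    ∀ d : PySem.Dict String (List (String × String)),
    (runs.foldl (fun d run =>
      let nm := rget run "name"
      if ¬ (tgt.contains nm) then d
      else if rget run "event" ≠ event then d
      else
        match d.get? nm with
        | none => d.insert nm run
        | some existing =>
          if decide (rget existing "created_at" < rget run "created_at") then d.insert nm run
          else d) d).get? name =
    runs.foldl (fun best run =>
      if rget run "name" ≠ name ∨ rget run "event" ≠ event then best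
      else
        match best with
        | none => some run
        | some b =>
          if decide (rget b "created_at" < rget run "created_at") then some run else best)
      (d.get? name) := by
  induction runs with
  | nil => intro d; rfl
  | cons run rest ih =>
    intro d
    simp only [List.foldl_cons]
    rw [ih]
    congr 1
    by_cases h1 : rget run "name" = name
    · rw [h1]
      rw [if_neg (by simp only [not_not]; exact hmem)]
      by_cases h2 : rget run "event" = event
      · rw [if_neg (by simp [h2]), if_neg (by simp [h2])]
        cases hd : d.get? name with
        | none => exact PySem.Dict.get?_insert_self d name run
        | some e =>
          by_cases hlt : rget e "created_at" < rget run "created_at"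
          · simp [hlt, PySem.Dict.get?_insert_self]
          · simp [hlt, hd]
      · rw [if_pos (show rget run "event" ≠ event from h2),
            if_pos (Or.inr (show rget run "event" ≠ event from h2))]
    · have hne : ∀ v, (d.insert (rget run "name") v).get? name = d.get? name :=
        fun v => PySem.Dict.get?_insert_of_ne d v (fun h => h1 h.symm)
      rw [if_pos (Or.inl (show rget run "name" ≠ name from h1))]
      by_cases ht : tgt.contains (rget run "name") = true
      · rw [if_neg (by simp only [not_not]; exact ht)]
        by_cases h2 : rget run "event" = event
        · rw [if_neg (by simp [h2])]
          cases hd : d.get? (rget run "name") with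
          | none => exact hne run
          | some e =>
            by_cases hlt : rget e "created_at" < rget run "created_at"
            · simp [hlt, hne]
            · simp [hlt]
        · rw [if_pos (show rget run "event" ≠ event from h2)]
      · rw [if_pos ht]

-- the dict's entry at a platform name is exactly B's per-name best
theorem aBuild_get? (runs : List (List (String × String))) (platforms : List String)
    (event : String) (name : String) (hmem : name ∈ platforms) :
    (aBuild runs platforms event).get? name = bBest runs name event := by
  have hc : (PySem.Set.ofList platforms).contains name = true := by
    simpa using (PySem.Set.mem_ofList platforms name).2 hmem
  have := loop_get (PySem.Set.ofList platforms) event name hc runs PySem.Dict.empty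
  simpa [aBuild, bBest, PySem.Dict.get?_empty] using this

-- B's accumulator loop is the three filters
theorem bFold_eq (runs : List (List (String × String))) (event : String)
    (platforms : List String) (m i f : List String) :
    platforms.foldl (bStep runs event) (m, i, f) =
      (m ++ platforms.filter (fun n => (bBest runs n event).isNone),
       i ++ platforms.filter (fun n =>
         match bBest runs n event with
         | none => false
         | some b => rget b "status" ≠ "completed"),
       f ++ platforms.filter (fun n =>
         match bBest runs n event with
         | none => false
         | some b => rget b "status" = "completed" ∧ rget b "conclusion" ≠ "success")) := by
  induction platforms generalizing m i f with
  | nil => simp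
  | cons n ns ih =>
    rw [List.foldl_cons]
    cases hb : bBest runs n event with
    | none =>
      simp only [bStep, hb]
      rw [ih]
      simp [hb]
    | some b =>
      simp only [bStep, hb]
      by_cases hs : rget b "status" = "completed"
      · by_cases hc : rget b "conclusion" = "success"
        · rw [if_neg (by simp [hs]), if_neg (by simp [hc])]
          rw [ih]
          simp [hb, hs, hc]
        · rw [if_neg (by simp [hs]), if_pos (show rget b "conclusion" ≠ "success" from hc)]
          rw [ih]
          simp [hb, hs, hc]
      · rw [if_pos (show rget b "status" ≠ "completed" from hs)]
        rw [ih]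
        simp [hb, hs]

-- ===== VERDICT (by name: the statement is the Claim_ definition above) =====
theorem evaluate_readiness_spec : Claim_equal_evaluate_readiness := by
  intro runs platforms event _
  unfold Spec_evaluate_readiness
  have hget : ∀ n ∈ platforms, (aBuild runs platforms event).get? n = bBest runs n event :=
    fun n hn => aBuild_get? runs platforms event n hn
  have hm : platforms.filter (fun name => ¬ (aBuild runs platforms event).contains name)
      = platforms.filter (fun n => (bBest runs n event).isNone) := by
    refine List.filter_congr (fun n hn => ?_)
    rw [PySem.Dict.contains_eq_isSome_get?, hget n hn]
    cases bBest runs n event <;> simp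
  have hi : platforms.filter (fun name =>
        (aBuild runs platforms event).contains name ∧
          rget ((aBuild runs platforms event).getD name []) "status" ≠ "completed")
      = platforms.filter (fun n =>
          match bBest runs n event with
          | none => false
          | some b => rget b "status" ≠ "completed") := by
    refine List.filter_congr (fun n hn => ?_)
    rw [PySem.Dict.contains_eq_isSome_get?, PySem.Dict.getD_eq_get?_getD, hget n hn]
    cases bBest runs n event <;> simp
  have hf : platforms.filter (fun name =>
        (aBuild runs platforms event).contains name ∧
          rget ((aBuild runs platforms event).getD name []) "status" = "completed" ∧
            rget ((aBuild runs platforms event).getD name []) "conclusion" ≠ "success")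
      = platforms.filter (fun n =>
          match bBest runs n event with
          | none => false
          | some b => rget b "status" = "completed" ∧ rget b "conclusion" ≠ "success") := by
    refine List.filter_congr (fun n hn => ?_)
    rw [PySem.Dict.contains_eq_isSome_get?, PySem.Dict.getD_eq_get?_getD, hget n hn]
    cases bBest runs n event <;> simp
  show evaluate_readiness runs platforms event = evaluate_readiness_alt runs platforms event
  simp only [evaluate_readiness, evaluate_readiness_alt]
  rw [bFold_eq runs event platforms [] [] []]
  simp only [List.nil_append]
  rw [hm, hi, hf]
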